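-- pv_equiv track=rewrite | github.com/ecapital1/puppetcode | test/iToolBox2/src/lib/tradereport.py | generatePLPerAccountCSV
-- ===== SOURCE A (Python) =====
-- def generatePLPerAccountCSV(account, header, product_sums):
--     report = [];
--     report.append("ACCOUNT,%s"%account);
--
--     product_line = "PRODUCT,"
--     for product in header:
--         product_line += '%s,'%product;
--     report.append(product_line);
--
--     com_line = 'COM,';
--     for record in product_sums:
--         com_line += '%s,'%record[0];
--     report.append(com_line);
--
--     gst_line = 'GST,';
--     for record in product_sums:
--         gst_line += '%s,'%record[1];
--     report.append(gst_line);
--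
--
--     npl_line = 'NPL,';
--     for record in product_sums:
--         npl_line += '%s,'%record[2];
--     report.append(npl_line);
--
--
--     return report;
-- ===== SOURCE B (Python) =====
-- def generatePLPerAccountCSV(account, header, product_sums):
--     com, gst, npl = ['COM'], ['GST'], ['NPL']
--     for c, g, n in product_sums:
--         com.append('%s' % c)
--         gst.append('%s' % g)
--         npl.append('%s' % n)
--     return ["ACCOUNT,%s" % account,
--             ','.join(['PRODUCT'] + ['%s' % h for h in header]) + ',',
--             ','.join(com) + ',',
--             ','.join(gst) + ',',
--             ','.join(npl) + ',']
-- ===== Notes on version B (the rewrite author's own statement) =====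
-- stated objective: alternative
-- what changed: Three separate string-concatenation loops over product_sums are replaced by one pass with tuple unpacking that collects the three columns into lists, and every line is produced by ','.join instead of repeated '+=' concatenation.
import Mathlib
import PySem

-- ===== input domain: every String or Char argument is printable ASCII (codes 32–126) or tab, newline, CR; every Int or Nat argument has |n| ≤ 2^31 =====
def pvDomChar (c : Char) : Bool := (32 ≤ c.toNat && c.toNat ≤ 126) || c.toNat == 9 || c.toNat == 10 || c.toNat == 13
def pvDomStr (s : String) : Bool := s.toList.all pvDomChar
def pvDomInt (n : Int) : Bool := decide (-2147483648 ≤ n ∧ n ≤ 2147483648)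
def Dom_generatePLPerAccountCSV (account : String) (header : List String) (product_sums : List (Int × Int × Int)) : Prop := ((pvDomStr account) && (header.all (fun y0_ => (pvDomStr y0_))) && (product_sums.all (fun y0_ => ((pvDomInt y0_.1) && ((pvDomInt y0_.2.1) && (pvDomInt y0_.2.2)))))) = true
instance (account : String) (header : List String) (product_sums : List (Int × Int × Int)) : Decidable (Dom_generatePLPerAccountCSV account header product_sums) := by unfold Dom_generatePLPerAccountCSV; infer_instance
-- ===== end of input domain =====

-- B collects the three columns in one pass and builds each line with ','.join; alternative decomposition, same results.
-- ===== PORT A =====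
def generatePLPerAccountCSV (account : String) (header : List String) (product_sums : List (Int × Int × Int)) : List String :=
  let report : List String := []
  let report := report ++ ["ACCOUNT," ++ account]
  let product_line := header.foldl (fun l p => l ++ p ++ ",") "PRODUCT,"
  let report := report ++ [product_line]
  let com_line := product_sums.foldl (fun l r => l ++ PySem.Int.toStr r.1 ++ ",") "COM,"
  let report := report ++ [com_line]
  let gst_line := product_sums.foldl (fun l r => l ++ PySem.Int.toStr r.2.1 ++ ",") "GST,"
  let report := report ++ [gst_line]
  let npl_line := product_sums.foldl (fun l r => l ++ PySem.Int.toStr r.2.2 ++ ",") "NPL,"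
  let report := report ++ [npl_line]
  report

-- ===== PORT B =====
def generatePLPerAccountCSV_alt (account : String) (header : List String) (product_sums : List (Int × Int × Int)) : List String :=
  let cols := product_sums.foldl
    (fun (t : List String × List String × List String) r =>
      (t.1 ++ [PySem.Int.toStr r.1], t.2.1 ++ [PySem.Int.toStr r.2.1], t.2.2 ++ [PySem.Int.toStr r.2.2]))
    (["COM"], ["GST"], ["NPL"])
  ["ACCOUNT," ++ account,
   PySem.Str.join "," ("PRODUCT" :: header.map (fun h => h)) ++ ",",
   PySem.Str.join "," cols.1 ++ ",",
   PySem.Str.join "," cols.2.1 ++ ",",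
   PySem.Str.join "," cols.2.2 ++ ","]

-- ===== PRECONDITION & SPEC =====
def Spec_generatePLPerAccountCSV (account : String) (header : List String) (product_sums : List (Int × Int × Int)) (out : List String) : Prop := out = generatePLPerAccountCSV_alt account header product_sums
instance (account : String) (header : List String) (product_sums : List (Int × Int × Int)) (out : List String) : Decidable (Spec_generatePLPerAccountCSV account header product_sums out) := by unfold Spec_generatePLPerAccountCSV; infer_instance

-- ===== CLAIM (what is proved, stated in full; the proofs are below) =====
def Claim_equal_generatePLPerAccountCSV : Prop := ∀ (account : String) (header : List String) (product_sums : List (Int × Int × Int)), Dom_generatePLPerAccountCSV account header product_sums → Spec_generatePLPerAccountCSV account header product_sums (generatePLPerAccountCSV account header product_sums)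

-- ===== LEMMAS AND PROOFS =====

-- hoist a prefix out of A's string-concatenation fold
theorem pv_foldl_hoist_str (xs : List String) (s r : String) :
    xs.foldl (fun l p => l ++ p ++ ",") (s ++ r) = s ++ xs.foldl (fun l p => l ++ p ++ ",") r := by
  induction xs generalizing r with
  | nil => rfl
  | cons x t ih =>
      rw [List.foldl_cons, List.foldl_cons,
        show s ++ r ++ x ++ "," = s ++ (r ++ x ++ ",") by simp [String.append_assoc], ih]

-- A's concat loop equals B's join of the collected parts
theorem pv_join_line_str (l : List String) (h : String) :
    PySem.Str.join "," (h :: l) ++ "," = l.foldl (fun acc p => acc ++ p ++ ",") (h ++ ",") := by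
  induction l generalizing h with
  | nil => simp [PySem.Str.join]
  | cons x t ih =>
      have hc : PySem.Str.join "," (h :: x :: t) = h ++ "," ++ PySem.Str.join "," (x :: t) := by
        apply String.toList_inj.mp
        simp [PySem.Str.toList_join, PySem.Chars.join_cons_cons]
      rw [List.foldl_cons,
        show h ++ "," ++ x ++ "," = (h ++ ",") ++ (x ++ ",") by simp [String.append_assoc],
        pv_foldl_hoist_str t (h ++ ",") (x ++ ","), ← ih x, hc]
      simp [String.append_assoc]

theorem pv_join_line (g : (Int × Int × Int) → String) (xs : List (Int × Int × Int)) (h : String) :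
    PySem.Str.join "," (h :: xs.map g) ++ "," = xs.foldl (fun acc p => acc ++ g p ++ ",") (h ++ ",") := by
  rw [pv_join_line_str]
  induction xs generalizing h with
  | nil => rfl
  | cons x t ih => simp only [List.map, List.foldl]; exact ih _

-- B's one-pass fold collects exactly the three mapped columns
theorem pv_cols (xs : List (Int × Int × Int)) (a b c : List String) :
    xs.foldl
      (fun (t : List String × List String × List String) r =>
        (t.1 ++ [PySem.Int.toStr r.1], t.2.1 ++ [PySem.Int.toStr r.2.1], t.2.2 ++ [PySem.Int.toStr r.2.2]))
      (a, b, c)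
      = (a ++ xs.map (fun r => PySem.Int.toStr r.1),
         b ++ xs.map (fun r => PySem.Int.toStr r.2.1),
         c ++ xs.map (fun r => PySem.Int.toStr r.2.2)) := by
  induction xs generalizing a b c with
  | nil => simp
  | cons x t ih => simp [List.foldl, ih, List.append_assoc]

-- ===== VERDICT (by name: the statement is the Claim_ definition above) =====
theorem generatePLPerAccountCSV_spec : Claim_equal_generatePLPerAccountCSV := by
  intro account header product_sums _
  unfold Spec_generatePLPerAccountCSV generatePLPerAccountCSV generatePLPerAccountCSV_alt
  simp only [pv_cols, List.nil_append, List.map_id_fun', id, List.cons_append]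
  rw [pv_join_line_str header "PRODUCT", pv_join_line _ product_sums "COM",
      pv_join_line _ product_sums "GST", pv_join_line _ product_sums "NPL"]
  rfl
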